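-- pv_equiv track=rewrite | github.com/patricksurry/eastern-front-1941 | scripts/matchmaps.py | uniquemarkers
-- ===== SOURCE A (Python) =====
-- def uniquemarkers(data, chunk, step=1):
--     markers = {}
--     for i in range(0, len(data), step):
--         s = data[i:i+chunk]
--         if s in markers:
--             markers[s] = -1
--         else:
--             markers[s] = i
--     return {k: v for (k, v) in markers.items() if v >= 0}
-- ===== SOURCE B (Python) =====
-- def uniquemarkers(data, chunk, step=1):
--     # pass 1: frequency table of all stepped chunks
--     counts = {}
--     for i in range(0, len(data), step):
--         s = data[i:i+chunk]
--         counts[s] = counts.get(s, 0) + 1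
--     # pass 2: select the chunks that occur exactly once, keyed at their position
--     result = {}
--     for i in range(0, len(data), step):
--         s = data[i:i+chunk]
--         if counts[s] == 1:
--             result[s] = i
--     return result
-- ===== Notes on version B (the rewrite author's own statement) =====
-- stated objective: alternative
-- what changed: Replaces A's single-pass sentinel-overwrite dict (-1 marks repeats, then a >=0 filter) with a two-pass count-then-select structure: first build a frequency table of all stepped chunks, then collect positions of the chunks whose count is exactly 1.
import Mathlib
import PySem

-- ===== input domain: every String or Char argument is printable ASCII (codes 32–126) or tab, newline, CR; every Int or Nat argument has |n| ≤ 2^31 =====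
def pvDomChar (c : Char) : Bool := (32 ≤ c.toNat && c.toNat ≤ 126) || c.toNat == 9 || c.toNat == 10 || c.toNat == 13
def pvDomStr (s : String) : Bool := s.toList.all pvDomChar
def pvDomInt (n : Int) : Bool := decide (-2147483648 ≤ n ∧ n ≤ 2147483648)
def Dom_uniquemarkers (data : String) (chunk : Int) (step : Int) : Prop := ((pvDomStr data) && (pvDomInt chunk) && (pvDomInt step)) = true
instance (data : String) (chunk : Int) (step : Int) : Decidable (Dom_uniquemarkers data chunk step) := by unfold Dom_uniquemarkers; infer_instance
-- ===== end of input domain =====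

-- B replaces A's single-pass sentinel-overwrite dict with a two-pass count-then-select structure (same cost, different decomposition).


-- data[i:i+chunk] (shared by both ports; both Pythons compute exactly this slice)
def pvChunkAt (data : String) (chunk : Int) (i : Int) : String :=
  String.mk (PySem.List.slice data.toList (some i) (some (i + chunk)))

-- ===== PORT A =====
def uniquemarkers (data : String) (chunk : Int) (step : Int) : List (String × Int) :=
  let markers :=
    (PySem.List.pyRange 0 (PySem.Str.len data) step).foldl
      (fun (m : PySem.Dict String Int) i =>
        let s := pvChunkAt data chunk i
        if m.contains s then m.insert s (-1) else m.insert s i)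
      PySem.Dict.empty
  markers.items.filter (fun kv => decide (0 ≤ kv.2))

-- ===== PORT B =====
def uniquemarkers_alt (data : String) (chunk : Int) (step : Int) : List (String × Int) :=
  let counts :=
    (PySem.List.pyRange 0 (PySem.Str.len data) step).foldl
      (fun (c : PySem.Dict String Int) i =>
        let s := pvChunkAt data chunk i
        c.insert s (c.getD s 0 + 1))
      PySem.Dict.empty
  let result :=
    (PySem.List.pyRange 0 (PySem.Str.len data) step).foldl
      (fun (r : PySem.Dict String Int) i =>
        let s := pvChunkAt data chunk i
        if counts.getD s 0 == 1 then r.insert s i else r)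
      PySem.Dict.empty
  result.items

-- ===== PRECONDITION & SPEC =====
-- Pre_ excludes only step = 0, on which Python's range raises ValueError.
def Pre_uniquemarkers (data : String) (chunk : Int) (step : Int) : Prop := step ≠ 0
instance (data : String) (chunk : Int) (step : Int) : Decidable (Pre_uniquemarkers data chunk step) := by unfold Pre_uniquemarkers; infer_instance

def pvWitness_uniquemarkers : String × Int × Int := ("abcab", 2, 1)

def Spec_uniquemarkers (data : String) (chunk : Int) (step : Int) (out : List (String × Int)) : Prop := out = uniquemarkers_alt data chunk step
instance (data : String) (chunk : Int) (step : Int) (out : List (String × Int)) : Decidable (Spec_uniquemarkers data chunk step out) := by unfold Spec_uniquemarkers; infer_instance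

-- ===== CLAIM (what is proved, stated in full; the proofs are below) =====
def Claim_equal_uniquemarkers : Prop := ∀ (data : String) (chunk : Int) (step : Int), Dom_uniquemarkers data chunk step → Pre_uniquemarkers data chunk step → Spec_uniquemarkers data chunk step (uniquemarkers data chunk step)

-- ===== LEMMAS AND PROOFS =====

-- every index produced by range(0, n, step) with n ≥ 0 is nonnegative
lemma pv_pyRange_nonneg (n s : Int) (hn : 0 ≤ n) : ∀ i ∈ PySem.List.pyRange 0 n s, 0 ≤ i := by
  intro i hi
  rcases lt_trichotomy s 0 with hs | hs | hs
  · have hempty : PySem.List.pyRange 0 n s = [] := by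
      simp only [PySem.List.pyRange, if_neg (by omega : ¬ s = 0),
        if_neg (by omega : ¬ (0:Int) < s), if_neg (by omega : ¬ n < 0)]
      simp
    rw [hempty] at hi; cases hi
  · subst hs; simp [PySem.List.pyRange] at hi
  · exact ((PySem.List.mem_pyRange_iff_of_pos hs i).mp hi).1

-- the repeated-key overwrite step: filtering after the in-place (-1) overwrite
lemma pv_filter_overwrite (s0 : String) (M : List String) (l : List (String × Int)) :
    (l.map (fun p => if p.1 == s0 then (s0, (-1 : Int)) else p)).filter
        (fun q => decide (0 ≤ q.2) && (M.count q.1 == 0))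
      = l.filter (fun q => decide (0 ≤ q.2) && ((s0 :: M).count q.1 == 0)) := by
  induction l with
  | nil => rfl
  | cons q l ih =>
    by_cases hq : q.1 = s0
    · have h1 : ((s0 :: M).count q.1 == 0) = false := by
        simp [hq, List.count_cons_self]
      simp only [List.map_cons, List.filter_cons, hq, beq_self_eq_true, if_true, h1,
        Bool.and_false]
      simpa using ih
    · have h2 : (q.1 == s0) = false := by simp [hq]
      have h3 : List.count q.1 (s0 :: M) = List.count q.1 M :=
        List.count_cons_of_ne (Ne.symm hq)
      rw [List.map_cons, h2, if_neg Bool.false_ne_true, List.filter_cons, List.filter_cons,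
        h3, ih]
  termination_by l.length

-- dropping the head of the remaining list when its chunk never occurs among the keys
lemma pv_filter_skip (s0 : String) (M : List String) (l : List (String × Int))
    (h : ∀ q ∈ l, q.1 ≠ s0) :
    l.filter (fun q => decide (0 ≤ q.2) && ((s0 :: M).count q.1 == 0))
      = l.filter (fun q => decide (0 ≤ q.2) && (M.count q.1 == 0)) := by
  apply List.filter_congr
  intro q hq
  rw [List.count_cons_of_ne (Ne.symm (h q hq))]

-- the loop invariant: A's markers dict filtered at the end equals B's select dict,
-- relative to the global frequency table `counts`
lemma pv_inv (f : Int → String) (counts : PySem.Dict String Int) :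
    ∀ (L : List Int) (m r : PySem.Dict String Int),
    (∀ i ∈ L, 0 ≤ i) →
    (∀ s, m.get? s = none → counts.getD s 0 = ((L.map f).count s : Int)) →
    (∀ s v, m.get? s = some v →
        (0 ≤ v → counts.getD s 0 = 1 + ((L.map f).count s : Int)) ∧
        (v < 0 → 2 + ((L.map f).count s : Int) ≤ counts.getD s 0)) →
    r.items = m.items.filter (fun kv => decide (0 ≤ kv.2) && ((L.map f).count kv.1 == 0)) →
    ((L.foldl (fun (m : PySem.Dict String Int) i =>
        if m.contains (f i) then m.insert (f i) (-1) else m.insert (f i) i) m).items.filter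
          (fun kv => decide (0 ≤ kv.2)))
      = (L.foldl (fun (r : PySem.Dict String Int) i =>
          if counts.getD (f i) 0 == 1 then r.insert (f i) i else r) r).items := by
  intro L
  induction L with
  | nil =>
    intro m r _ _ _ hr
    simp only [List.foldl_nil]
    rw [hr]
    apply List.filter_congr
    intro q hq
    simp
  | cons i L ih =>
    intro m r hnn hnone hsome hr
    have hi0 : (0:Int) ≤ i := hnn i (List.mem_cons_self ..)
    have hcnt_self : ((i :: L).map f).count (f i) = (L.map f).count (f i) + 1 := by
      simp [List.count_cons_self]
    simp only [List.foldl_cons, List.map_cons] at *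
    by_cases hc : m.contains (f i) = true
    · -- repeated chunk: A overwrites with -1, B skips (its count is ≥ 2)
      obtain ⟨v, hv⟩ : ∃ v, m.get? (f i) = some v := by
        have := PySem.Dict.contains_eq_isSome_get? (d := m) (k := f i)
        rw [hc] at this
        exact Option.isSome_iff_exists.mp this.symm
      have hge : (2:Int) + ((L.map f).count (f i) : Int) ≤ counts.getD (f i) 0 := by
        have h2 := hsome (f i) v hv
        by_cases h0 : 0 ≤ v
        · have := h2.1 h0
          rw [List.count_cons_self] at this
          push_cast at this ⊢
          omega
        · have := h2.2 (by omega)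
          rw [List.count_cons_self] at this
          push_cast at this ⊢
          omega
      have hB : (counts.getD (f i) 0 == 1) = false := by
        have : counts.getD (f i) 0 ≠ 1 := by
          have : (0:Int) ≤ ((L.map f).count (f i) : Int) := Int.natCast_nonneg _
          omega
        simpa using this
      rw [if_pos hc, hB, if_neg (by simp)]
      apply ih (m.insert (f i) (-1)) r (fun j hj => hnn j (List.mem_cons_of_mem _ hj))
      · intro s hs
        rw [PySem.Dict.get?_insert] at hs
        by_cases hsf : s = f i
        · simp [hsf] at hs
        · rw [if_neg hsf] at hs
          have := hnone s hs
          rwa [List.count_cons_of_ne (Ne.symm hsf)] at this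
      · intro s w hw
        rw [PySem.Dict.get?_insert] at hw
        by_cases hsf : s = f i
        · rw [if_pos hsf] at hw
          injection hw with hw
          subst hsf
          constructor
          · intro h; omega
          · intro _; exact hge
        · rw [if_neg hsf] at hw
          have := hsome s w hw
          rw [List.count_cons_of_ne (Ne.symm hsf)] at this
          exact this
      · rw [hr, PySem.Dict.items_insert_of_contains m (-1) hc, pv_filter_overwrite]
    · -- fresh chunk: A records i, B inserts i iff the global count is 1
      have hno : m.get? (f i) = none := by
        rw [PySem.Dict.get?_eq_none_iff_contains]
        simpa using hc
      have htot : counts.getD (f i) 0 = (((L.map f).count (f i) : Int) + 1) := by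
        have := hnone (f i) hno
        rw [List.count_cons_self] at this
        push_cast at this
        omega
      have hmkeys : ∀ q ∈ m.items, q.1 ≠ f i := by
        intro q hq hq1
        have : q.1 ∈ m.keys := PySem.Dict.mem_keys_of_mem_items m hq
        rw [hq1, ← PySem.Dict.contains_iff_mem_keys] at this
        exact absurd this (by simpa using hc)
      rw [if_neg hc]
      by_cases h0 : (L.map f).count (f i) = 0
      · -- unique chunk overall
        have hB : (counts.getD (f i) 0 == 1) = true := by
          simp [htot, h0]
        rw [hB, if_pos rfl]
        apply ih (m.insert (f i) i) (r.insert (f i) i)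
          (fun j hj => hnn j (List.mem_cons_of_mem _ hj))
        · intro s hs
          rw [PySem.Dict.get?_insert] at hs
          by_cases hsf : s = f i
          · simp [hsf] at hs
          · rw [if_neg hsf] at hs
            have := hnone s hs
            rwa [List.count_cons_of_ne (Ne.symm hsf)] at this
        · intro s w hw
          rw [PySem.Dict.get?_insert] at hw
          by_cases hsf : s = f i
          · rw [if_pos hsf] at hw
            injection hw with hw
            subst hsf
            constructor
            · intro _; rw [htot]; omega
            · intro hlt; omega
          · rw [if_neg hsf] at hw
            have := hsome s w hw
            rw [List.count_cons_of_ne (Ne.symm hsf)] at this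
            exact this
        · have hrc : r.contains (f i) = false := by
            by_contra hcon
            have : r.contains (f i) = true := by
              cases h : r.contains (f i) with
              | false => exact absurd h hcon
              | true => rfl
            rw [PySem.Dict.contains_iff_mem_keys] at this
            have : f i ∈ r.items.map Prod.fst := this
            rw [hr] at this
            obtain ⟨q, hq, hq1⟩ := List.mem_map.mp this
            exact hmkeys q (List.mem_of_mem_filter hq) hq1
          rw [PySem.Dict.items_insert_of_not_contains r i hrc,
            PySem.Dict.items_insert_of_not_contains m i (by simpa using hc),
            List.filter_append, ← pv_filter_skip (f i) _ _ hmkeys, ← hr]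
          simp [hi0, h0]
      · -- chunk repeats later: B skips now, A's i will be overwritten later
        have hB : (counts.getD (f i) 0 == 1) = false := by
          have : counts.getD (f i) 0 ≠ 1 := by omega
          simpa using this
        rw [hB, if_neg (by simp)]
        apply ih (m.insert (f i) i) r
          (fun j hj => hnn j (List.mem_cons_of_mem _ hj))
        · intro s hs
          rw [PySem.Dict.get?_insert] at hs
          by_cases hsf : s = f i
          · simp [hsf] at hs
          · rw [if_neg hsf] at hs
            have := hnone s hs
            rwa [List.count_cons_of_ne (Ne.symm hsf)] at this
        · intro s w hw
          rw [PySem.Dict.get?_insert] at hw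
          by_cases hsf : s = f i
          · rw [if_pos hsf] at hw
            injection hw with hw
            subst hsf
            constructor
            · intro _; rw [htot]; omega
            · intro hlt; omega
          · rw [if_neg hsf] at hw
            have := hsome s w hw
            rw [List.count_cons_of_ne (Ne.symm hsf)] at this
            exact this
        · rw [hr, PySem.Dict.items_insert_of_not_contains m i (by simpa using hc),
            List.filter_append, pv_filter_skip _ _ _ hmkeys]
          simp [h0]

-- ===== VERDICT (by name: the statement is the Claim_ definition above) =====
theorem uniquemarkers_spec : Claim_equal_uniquemarkers := by
  intro data chunk step _ _
  unfold Spec_uniquemarkers uniquemarkers uniquemarkers_alt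
  set f := pvChunkAt data chunk with hf
  set L := PySem.List.pyRange 0 (PySem.Str.len data) step with hL
  set counts := L.foldl
      (fun (c : PySem.Dict String Int) i => c.insert (f i) (c.getD (f i) 0 + 1))
      PySem.Dict.empty with hcounts
  have hcget : ∀ s, counts.getD s 0 = ((L.map f).count s : Int) := by
    intro s
    have : counts = PySem.Dict.counter (L.map f) := by
      rw [hcounts, ← PySem.Dict.foldl_insert_getD_add_one_eq_counter, List.foldl_map]
    rw [this, PySem.Dict.getD_counter]
  have hnn : ∀ i ∈ L, 0 ≤ i := by
    apply pv_pyRange_nonneg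
    rw [PySem.Str.len_eq]
    exact Int.natCast_nonneg _
  exact pv_inv f counts L PySem.Dict.empty PySem.Dict.empty hnn
    (fun s _ => hcget s)
    (fun s v h => by simp [PySem.Dict.get?_empty] at h)
    (by rfl)
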